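-- pv_equiv track=rewrite | github.com/heechul/drama | re/gf2_bank_solver.py | apply_matrix_row
-- ===== SOURCE A (Python) =====
-- from typing import List, Tuple
--
-- def apply_matrix_row(row_bits: List[int], X: List[List[int]]) -> Tuple[int, ...]:
--     if not X:
--         return tuple()
--     n = len(X)
--     k = len(X[0]) if X[0] else 0
--     if k == 0:
--         return tuple()
--     one_cols = [i for i, v in enumerate(row_bits) if v]
--     code = [0] * k
--     for j in range(k):
--         sbit = 0
--         for c in one_cols:
--             sbit ^= X[c][j]
--         code[j] = sbit
--     return tuple(code)
-- ===== SOURCE B (Python) =====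
-- def apply_matrix_row(row_bits, X):
--     if not X:
--         return tuple()
--     k = len(X[0]) if X[0] else 0
--     if k == 0:
--         return tuple()
--     rows = [X[i] for i, v in enumerate(row_bits) if v]
--
--     def reduce(lo, hi):
--         # XOR of rows[lo:hi], as a balanced binary reduction tree
--         if hi - lo == 0:
--             return [0] * k
--         if hi - lo == 1:
--             return [rows[lo][j] for j in range(k)]
--         mid = (lo + hi) // 2
--         L = reduce(lo, mid)
--         R = reduce(mid, hi)
--         return [L[j] ^ R[j] for j in range(k)]
--
--     return tuple(reduce(0, len(rows)))
-- ===== Notes on version B (the rewrite author's own statement) =====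
-- stated objective: alternative
-- what changed: A builds the list of selected indices and computes each output column by an inner linear scan over it; B gathers the selected rows and combines them by a balanced divide-and-conquer reduction tree (recursive halving with elementwise XOR of the two halves), changing the traversal and shape of the computation.
import Mathlib
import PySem

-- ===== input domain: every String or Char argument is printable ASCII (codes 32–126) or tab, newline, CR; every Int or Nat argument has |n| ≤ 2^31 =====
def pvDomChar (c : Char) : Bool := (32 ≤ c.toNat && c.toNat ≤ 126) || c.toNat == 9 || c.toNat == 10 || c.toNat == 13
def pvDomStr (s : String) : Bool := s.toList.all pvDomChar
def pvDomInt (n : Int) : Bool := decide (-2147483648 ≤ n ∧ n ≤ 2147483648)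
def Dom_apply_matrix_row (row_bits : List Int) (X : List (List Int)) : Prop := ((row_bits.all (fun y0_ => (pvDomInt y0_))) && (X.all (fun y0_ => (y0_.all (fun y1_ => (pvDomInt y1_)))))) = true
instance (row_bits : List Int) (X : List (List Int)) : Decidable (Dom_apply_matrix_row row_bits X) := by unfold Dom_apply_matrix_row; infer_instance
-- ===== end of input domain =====

-- B replaces A's column-major double loop over a selected-index list by a balanced
-- divide-and-conquer reduction tree over the selected rows (objective: alternative).

-- ===== PORT A =====
-- literal port of A: build one_cols, then for each column j scan one_cols and set code[j]
def apply_matrix_row (row_bits : List Int) (X : List (List Int)) : List Int :=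
  if X = [] then []
  else
    let k : Nat := (X.headD []).length
    if k = 0 then []
    else
      let one_cols : List Int :=
        (PySem.List.enumerate row_bits).filterMap
          (fun p => if p.2 ≠ 0 then some p.1 else none)
      (List.range k).foldl
        (fun code j =>
          code.set j
            (one_cols.foldl
              (fun sbit c => PySem.Int.bxor sbit ((PySem.List.pyGetD X c []).getD j 0)) 0))
        (List.replicate k 0)

-- ===== PORT B =====
-- literal port of B: balanced binary reduction tree over the selected rows
-- (fuel = hi - lo is only a totality device; it never alters the computed value)
def altReduceGo (rows : List (List Int)) (k : Nat) : Nat → Nat → Nat → List Int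
  | 0, _, _ => List.replicate k 0
  | fuel + 1, lo, hi =>
    if hi - lo = 0 then List.replicate k 0
    else if hi - lo = 1 then (List.range k).map (fun j => (rows.getD lo []).getD j 0)
    else
      let mid := (lo + hi) / 2
      let L := altReduceGo rows k fuel lo mid
      let R := altReduceGo rows k fuel mid hi
      (List.range k).map (fun j => PySem.Int.bxor (L.getD j 0) (R.getD j 0))

def apply_matrix_row_alt (row_bits : List Int) (X : List (List Int)) : List Int :=
  if X = [] then []
  else
    let k : Nat := (X.headD []).length
    if k = 0 then []
    else
      let rows : List (List Int) :=
        (PySem.List.enumerate row_bits).filterMap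
          (fun p => if p.2 ≠ 0 then some (PySem.List.pyGetD X p.1 []) else none)
      altReduceGo rows k rows.length 0 rows.length

-- ===== PRECONDITION & SPEC =====
-- Pre_ excludes exactly the inputs where Python A raises IndexError: a truthy
-- row_bits[i] selecting a row index i that is out of range of X, or a selected
-- row shorter than k = len(X[0]).
def Pre_apply_matrix_row (row_bits : List Int) (X : List (List Int)) : Prop :=
  X = [] ∨ (X.headD []).length = 0 ∨
    ∀ i < row_bits.length, row_bits.getD i 0 ≠ 0 →
      i < X.length ∧ (X.headD []).length ≤ (X.getD i []).length
instance (row_bits : List Int) (X : List (List Int)) : Decidable (Pre_apply_matrix_row row_bits X) := by unfold Pre_apply_matrix_row; infer_instance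
def pvWitness_apply_matrix_row : List Int × List (List Int) := ([1, 0, 1], [[1, 0], [0, 1], [1, 1]])

def Spec_apply_matrix_row (row_bits : List Int) (X : List (List Int)) (out : List Int) : Prop := out = apply_matrix_row_alt row_bits X
instance (row_bits : List Int) (X : List (List Int)) (out : List Int) : Decidable (Spec_apply_matrix_row row_bits X out) := by unfold Spec_apply_matrix_row; infer_instance

-- ===== CLAIM (what is proved, stated in full; the proofs are below) =====
def Claim_equal_apply_matrix_row : Prop := ∀ (row_bits : List Int) (X : List (List Int)), Dom_apply_matrix_row row_bits X → Pre_apply_matrix_row row_bits X → Spec_apply_matrix_row row_bits X (apply_matrix_row row_bits X)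

-- ===== LEMMAS AND PROOFS =====

-- XOR is associative: via the sign/magnitude encoding of Python ints
def pvMag (a : Int) : Nat := if 0 <= a then a.toNat else (-a - 1).toNat

def pvEnc (s : Bool) (m : Nat) : Int := if s then -(m : Int) - 1 else (m : Int)

theorem pvMag_enc (s : Bool) (m : Nat) : pvMag (pvEnc s m) = m := by
  cases s <;> simp [pvEnc, pvMag] <;> omega

theorem pvEnc_decide (s : Bool) (m : Nat) : decide (pvEnc s m < 0) = s := by
  cases s <;> simp [pvEnc] <;> omega

theorem bxor_eq (a b : Int) :
    PySem.Int.bxor a b = pvEnc (xor (decide (a < 0)) (decide (b < 0))) (pvMag a ^^^ pvMag b) := by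
  unfold PySem.Int.bxor pvEnc pvMag
  by_cases ha : 0 <= a <;> by_cases hb : 0 <= b
  · simp [ha, hb, Int.not_lt.mpr ha, Int.not_lt.mpr hb]
  · simp [ha, hb, Int.not_lt.mpr ha, Int.not_le.mp hb]
  · simp [ha, hb, Int.not_le.mp ha, Int.not_lt.mpr hb]
  · simp [ha, hb, Int.not_le.mp ha, Int.not_le.mp hb]

theorem bxor_assoc (a b c : Int) :
    PySem.Int.bxor (PySem.Int.bxor a b) c = PySem.Int.bxor a (PySem.Int.bxor b c) := by
  rw [bxor_eq a b, bxor_eq b c, bxor_eq (pvEnc _ _) c, bxor_eq a (pvEnc _ _)]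
  rw [pvMag_enc, pvMag_enc, pvEnc_decide, pvEnc_decide, Bool.xor_assoc, Nat.xor_assoc]

theorem zero_bxor (a : Int) : PySem.Int.bxor 0 a = a := by
  rw [PySem.Int.bxor_comm, PySem.Int.bxor_zero]

-- the per-column fold over a list of rows
def colfold (j : Nat) (a : Int) (rs : List (List Int)) : Int :=
  rs.foldl (fun s row => PySem.Int.bxor s (row.getD j 0)) a

theorem colfold_shift (j : Nat) (a : Int) (rs : List (List Int)) :
    colfold j a rs = PySem.Int.bxor a (colfold j 0 rs) := by
  induction rs generalizing a with
  | nil => simp [colfold, PySem.Int.bxor_zero]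
  | cons r rs ih =>
    simp only [colfold, List.foldl_cons] at *
    rw [ih (PySem.Int.bxor a (r.getD j 0)), ih (PySem.Int.bxor 0 (r.getD j 0)),
      zero_bxor, bxor_assoc]

theorem colfold_append (j : Nat) (l1 l2 : List (List Int)) :
    colfold j 0 (l1 ++ l2) = PySem.Int.bxor (colfold j 0 l1) (colfold j 0 l2) := by
  simp only [colfold, List.foldl_append]
  exact colfold_shift j _ l2

theorem map_range_getD (k j : Nat) (f : Nat → Int) (hj : j < k) :
    ((List.range k).map f).getD j 0 = f j := by
  rw [List.getD_eq_getElem _ _ (by simp [hj])]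
  simp

-- the reduction tree computes the per-column fold over rows[lo:hi]
theorem altReduce_eq (rows : List (List Int)) (k : Nat) :
    ∀ (fuel lo hi : Nat), hi - lo ≤ fuel → hi ≤ rows.length →
      altReduceGo rows k fuel lo hi
        = (List.range k).map (fun j => colfold j 0 ((rows.drop lo).take (hi - lo))) := by
  intro fuel
  induction fuel with
  | zero =>
    intro lo hi hn _
    have h0 : hi - lo = 0 := by omega
    simp [altReduceGo, h0, colfold]
  | succ fuel ih =>
    intro lo hi hn hhi
    unfold altReduceGo
    by_cases h0 : hi - lo = 0
    · simp [h0, colfold]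
    · simp only [if_neg h0]
      by_cases h1 : hi - lo = 1
      · have hlo : lo < rows.length := by omega
        have htake : List.take 1 (List.drop lo rows) = [rows[lo]] := by
          rw [List.drop_eq_getElem_cons hlo]; rfl
        rw [if_pos h1, h1, htake]
        apply List.map_congr_left
        intro j hj
        simp [colfold, zero_bxor, List.getD_eq_getElem?_getD,
          List.getElem?_eq_getElem hlo]
      · simp only [if_neg h1]
        have h2 : 2 ≤ hi - lo := by omega
        rw [ih lo ((lo + hi) / 2) (by omega) (by omega),
            ih ((lo + hi) / 2) hi (by omega) hhi]
        have hsplit : (rows.drop lo).take (hi - lo)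
            = (rows.drop lo).take ((lo + hi) / 2 - lo)
              ++ (rows.drop ((lo + hi) / 2)).take (hi - (lo + hi) / 2) := by
          have : hi - lo = ((lo + hi) / 2 - lo) + (hi - (lo + hi) / 2) := by omega
          rw [this, List.take_add, List.drop_drop]
          have : lo + ((lo + hi) / 2 - lo) = (lo + hi) / 2 := by omega
          rw [this]
        rw [hsplit]
        apply List.map_congr_left
        intro j hj
        rw [List.mem_range] at hj
        rw [colfold_append, map_range_getD _ _ _ hj, map_range_getD _ _ _ hj]

-- A's in-place update loop 'for j in range(m): code[j] = g j'
theorem setloop (g : Nat → Int) :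
    ∀ (m : Nat) (code : List Int), m ≤ code.length →
      (List.range m).foldl (fun cd j => cd.set j (g j)) code
        = (List.range m).map g ++ code.drop m := by
  intro m
  induction m with
  | zero => intro code _; simp
  | succ m ih =>
    intro code h
    rw [List.range_succ, List.foldl_append, List.map_append, ih code (by omega)]
    have hlen : ((List.range m).map g).length = m := by simp
    simp only [List.foldl_cons, List.foldl_nil, List.map_cons, List.map_nil]
    rw [List.set_append_right _ _ (by omega), hlen, Nat.sub_self,
      List.drop_eq_getElem_cons (show m < code.length by omega), List.set_cons_zero]
    simp only [List.append_assoc, List.cons_append, List.nil_append]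

-- the selected rows are the image of the selected indices
theorem rows_eq_map (row_bits : List Int) (X : List (List Int)) :
    (PySem.List.enumerate row_bits).filterMap
        (fun p => if p.2 ≠ 0 then some (PySem.List.pyGetD X p.1 []) else none)
      = ((PySem.List.enumerate row_bits).filterMap
          (fun p => if p.2 ≠ 0 then some p.1 else none)).map
            (fun c => PySem.List.pyGetD X c []) := by
  rw [List.map_filterMap]
  apply List.filterMap_congr
  intro p _
  by_cases hp : p.2 ≠ 0 <;> simp [hp]

-- ===== VERDICT (by name: the statement is the Claim_ definition above) =====
theorem apply_matrix_row_spec : Claim_equal_apply_matrix_row := by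
  intro row_bits X _ _
  unfold Spec_apply_matrix_row apply_matrix_row apply_matrix_row_alt
  by_cases hX : X = []
  · simp [hX]
  · simp only [if_neg hX]
    by_cases hk : (X.headD []).length = 0
    · simp only [if_pos hk]
    · simp only [if_neg hk]
      rw [setloop _ _ (List.replicate _ 0) (by simp)]
      rw [altReduce_eq _ _ _ 0 _ (by omega) (le_refl _)]
      rw [rows_eq_map]
      simp only [List.drop_zero, Nat.sub_zero, List.length_map,
        List.drop_replicate, Nat.sub_self, List.replicate_zero, List.append_nil]
      rw [List.take_of_length_le (by simp)]
      apply List.map_congr_left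
      intro j hj
      simp [colfold, List.foldl_map]
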